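-- pv_equiv track=rewrite | github.com/BharathHU/python-programming | Strings/sumCharDigi.py | sumCharDigits
-- ===== SOURCE A (Python) =====
-- def sumCharDigits(s):
--     res=""
--     sumCharDig=0
--     # sum up all the character digits amd collect rest of the char
--     for i in range(0,len(s)):
--         if "0" <=s[i]<="9":
--             sumCharDig=sumCharDig+(ord(s[i])-48)
--         else:
--             res=res+s[i]
--     # covertion of integer to string
--     num=""
--     while sumCharDig>0:
--         rem=sumCharDig%10
--         num=chr(rem+48)+num
--         sumCharDig=sumCharDig//10
--     return(res+num)
-- ===== SOURCE B (Python) =====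
-- def sumCharDigits(s):
--     total = sum(ord(c) - 48 for c in s if "0" <= c <= "9")
--     rest = "".join(c for c in s if not ("0" <= c <= "9"))
--     return rest + (str(total) if total else "")
-- ===== Notes on version B (the rewrite author's own statement) =====
-- stated objective: simpler
-- what changed: Replaces A's index loop with accumulator state and its hand-rolled base-10 digit-extraction while-loop by two filtering comprehensions plus the library str() conversion (suppressed when the sum is 0, matching A).
import Mathlib
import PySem

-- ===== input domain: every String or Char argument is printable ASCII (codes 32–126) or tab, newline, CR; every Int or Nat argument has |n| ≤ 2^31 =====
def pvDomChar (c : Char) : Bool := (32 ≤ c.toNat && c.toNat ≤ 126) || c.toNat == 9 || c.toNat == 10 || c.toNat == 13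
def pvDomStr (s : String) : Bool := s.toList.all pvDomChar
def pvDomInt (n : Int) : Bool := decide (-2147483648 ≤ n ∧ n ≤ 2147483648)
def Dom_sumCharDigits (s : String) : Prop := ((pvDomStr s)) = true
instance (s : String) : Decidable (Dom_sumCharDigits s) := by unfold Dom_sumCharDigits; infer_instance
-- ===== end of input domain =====

-- B replaces A's index loop + hand-rolled base-10 conversion by two filtering passes plus the
-- library str() conversion (suppressed when the sum is 0, as A's while-loop yields ""). Objective: simpler.

-- ===== PORT A =====
-- the 'while sumCharDig > 0' conversion loop of A; chr(rem+48) is Char.ofNat (exact: 0 ≤ rem < 10)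
def pvNumLoopA (n : Int) (num : List Char) : List Char :=
  if h : 0 < n then
    pvNumLoopA (PySem.Int.floordiv n 10) (Char.ofNat ((PySem.Int.mod n 10).toNat + 48) :: num)
  else num
termination_by n.toNat
decreasing_by
  rw [PySem.Int.floordiv_eq_ediv_of_pos (by omega : (0:Int) < 10)]
  omega

-- 'for i in range(0,len(s)): …' visits s[0],…,s[len-1] in order = a fold over s.toList
def sumCharDigits (s : String) : String :=
  let st := s.toList.foldl
    (fun (st : List Char × Int) c =>
      if '0' ≤ c ∧ c ≤ '9' then (st.1, st.2 + ((c.toNat : Int) - 48))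
      else (st.1 ++ [c], st.2)) ([], 0)
  String.ofList (st.1 ++ pvNumLoopA st.2 [])

-- ===== PORT B =====
def pvIsDig (c : Char) : Bool := decide ('0' ≤ c) && decide (c ≤ '9')

-- str(total) is PySem.Int.toChars; 'str(total) if total else ""' keeps it only when total ≠ 0
def sumCharDigits_alt (s : String) : String :=
  let total : Int := ((s.toList.filter pvIsDig).map (fun c => (c.toNat : Int) - 48)).sum
  let rest := s.toList.filter (fun c => !pvIsDig c)
  String.ofList (rest ++ (if total ≠ 0 then PySem.Int.toChars total else []))

-- ===== PRECONDITION & SPEC =====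
def Spec_sumCharDigits (s : String) (out : String) : Prop := out = sumCharDigits_alt s
instance (s : String) (out : String) : Decidable (Spec_sumCharDigits s out) := by unfold Spec_sumCharDigits; infer_instance

-- ===== CLAIM (what is proved, stated in full; the proofs are below) =====
def Claim_equal_sumCharDigits : Prop := ∀ (s : String), Dom_sumCharDigits s → Spec_sumCharDigits s (sumCharDigits s)

-- ===== LEMMAS AND PROOFS =====

-- A's loop state after consuming l, started from (res, sm)
lemma pv_foldA (l : List Char) (res : List Char) (sm : Int) :
    l.foldl
      (fun (st : List Char × Int) c =>
        if '0' ≤ c ∧ c ≤ '9' then (st.1, st.2 + ((c.toNat : Int) - 48))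
        else (st.1 ++ [c], st.2)) (res, sm) =
      (res ++ l.filter (fun c => !pvIsDig c),
       sm + ((l.filter pvIsDig).map (fun c => (c.toNat : Int) - 48)).sum) := by
  induction l generalizing res sm with
  | nil => simp
  | cons c t ih =>
    by_cases h : '0' ≤ c ∧ c ≤ '9'
    · have hd : pvIsDig c = true := by simp [pvIsDig, h.1, h.2]
      simp [List.foldl_cons, h, hd, ih]
      ring
    · have hd : pvIsDig c = false := by
        by_contra hc
        exact h (by simpa [pvIsDig] using eq_true_of_ne_false hc)
      simp [List.foldl_cons, h, hd, ih]

lemma pv_sum_nonneg (l : List Char) :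
    0 ≤ ((l.filter pvIsDig).map (fun c => (c.toNat : Int) - 48)).sum := by
  apply List.sum_nonneg
  intro x hx
  obtain ⟨c, hc, rfl⟩ := List.mem_map.mp hx
  have := List.of_mem_filter hc
  have h0 : '0' ≤ c := by
    simp [pvIsDig] at this
    exact this.1
  have h48 : (48 : Nat) ≤ c.toNat := Nat.succ_le_of_lt h0
  omega

-- the Nat shape of A's conversion loop
def pvNatNum (m : Nat) (acc : List Char) : List Char :=
  if 0 < m then pvNatNum (m / 10) (Nat.digitChar (m % 10) :: acc) else acc
termination_by m
decreasing_by omega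

lemma pv_ofNat_digitChar (r : Nat) (h : r < 10) :
    Char.ofNat (r + 48) = Nat.digitChar r := by
  interval_cases r <;> rfl

lemma pv_numLoopA_natCast (m : Nat) (acc : List Char) :
    pvNumLoopA (m : Int) acc = pvNatNum m acc := by
  induction m using Nat.strong_induction_on generalizing acc with
  | _ m ih =>
    rw [pvNumLoopA, pvNatNum]
    by_cases h : 0 < m
    · rw [dif_pos (by exact_mod_cast h), if_pos h]
      have hf : PySem.Int.floordiv (m : Int) 10 = ((m / 10 : Nat) : Int) := by
        exact_mod_cast PySem.Int.floordiv_natCast m 10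
      have hm : PySem.Int.mod (m : Int) 10 = ((m % 10 : Nat) : Int) := by
        exact_mod_cast PySem.Int.mod_natCast m 10
      rw [hf, hm]
      have : ((((m % 10 : Nat) : Int)).toNat) = m % 10 := by omega
      rw [this, pv_ofNat_digitChar _ (Nat.mod_lt _ (by omega))]
      exact ih (m / 10) (by omega) _
    · rw [dif_neg (by exact_mod_cast h), if_neg h]

lemma pv_toDigitsCore_eq (f : Nat) : ∀ (m : Nat) (acc : List Char), 0 < m → m ≤ f →
    Nat.toDigitsCore 10 f m acc = pvNatNum m acc := by
  induction f with
  | zero => intro m acc h1 h2; omega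
  | succ f ih =>
    intro m acc h1 h2
    rw [pvNatNum, if_pos h1]
    show (if m / 10 = 0 then Nat.digitChar (m % 10) :: acc
          else Nat.toDigitsCore 10 f (m / 10) (Nat.digitChar (m % 10) :: acc)) = _
    by_cases hz : m / 10 = 0
    · rw [if_pos hz, hz, pvNatNum, if_neg (by omega)]
    · rw [if_neg hz, ih (m / 10) _ (by omega) (by omega)]

lemma pv_numLoopA_toChars (n : Int) (hn : 0 ≤ n) :
    pvNumLoopA n [] = if n ≠ 0 then PySem.Int.toChars n else [] := by
  by_cases h : n = 0
  · subst h; rw [pvNumLoopA]; simp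
  · rw [if_pos h]
    have hpos : 0 < n := lt_of_le_of_ne hn (Ne.symm h)
    obtain ⟨m, rfl⟩ : ∃ m : Nat, n = (m : Int) := ⟨n.toNat, by omega⟩
    rw [pv_numLoopA_natCast]
    have hm : 0 < m := by exact_mod_cast hpos
    unfold PySem.Int.toChars
    rw [if_neg (by omega), Nat.toDigits]
    have : (m : Int).toNat = m := by omega
    rw [this, pv_toDigitsCore_eq (m + 1) m [] hm (by omega)]

-- ===== VERDICT (by name: the statement is the Claim_ definition above) =====
theorem sumCharDigits_spec : Claim_equal_sumCharDigits := by
  intro s _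
  unfold Spec_sumCharDigits sumCharDigits sumCharDigits_alt
  rw [pv_foldA]
  simp only [List.nil_append, zero_add]
  rw [pv_numLoopA_toChars _ (pv_sum_nonneg s.toList)]
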